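-- pv_equiv track=rewrite | github.com/yeswanth6463/pypratice | programming/occurance.py | find_first_last_occurrences
-- ===== SOURCE A (Python) =====
-- def find_first_last_occurrences(lst):
--     occurrences = {}
--
--     for i in range(len(lst)):
--         element = lst[i]
--         if element not in occurrences:
--             occurrences[element] = [i, i]
--         else:
--             occurrences[element][1] = i
--
--     return occurrences
-- ===== SOURCE B (Python) =====
-- def find_first_last_occurrences(lst):
--     first = {}
--     for i, x in enumerate(lst):
--         if x not in first:
--             first[x] = i
--     last = {}
--     for i in reversed(range(len(lst))):
--         x = lst[i]
--         if x not in last: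
--             last[x] = i
--     return {x: [f, last[x]] for x, f in first.items()}
-- ===== Notes on version B (the rewrite author's own statement) =====
-- stated objective: alternative
-- what changed: Replaces the single interleaved loop that mutates a stored [first,last] pair with two independent passes (a forward pass recording first indices, a reverse pass recording last indices) combined by a final dict comprehension.
import Mathlib
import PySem

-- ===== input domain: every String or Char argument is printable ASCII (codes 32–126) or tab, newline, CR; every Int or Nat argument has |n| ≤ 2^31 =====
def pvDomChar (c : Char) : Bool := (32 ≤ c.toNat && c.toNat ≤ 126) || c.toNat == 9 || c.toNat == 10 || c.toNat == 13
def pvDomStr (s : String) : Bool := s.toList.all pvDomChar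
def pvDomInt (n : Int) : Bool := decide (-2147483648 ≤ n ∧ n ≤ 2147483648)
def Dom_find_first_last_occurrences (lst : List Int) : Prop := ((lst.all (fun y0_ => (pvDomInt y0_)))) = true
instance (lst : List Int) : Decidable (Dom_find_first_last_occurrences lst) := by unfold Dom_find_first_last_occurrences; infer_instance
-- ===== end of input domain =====

-- B replaces A's single interleaved loop (which mutates a stored [first, last] pair) by two
-- independent passes — forward for first indices, reverse for last indices — merged by a
-- final dict comprehension; same cost, different decomposition.

-- ===== PORT A =====
def find_first_last_occurrences (lst : List Int) : List (Int × List Int) :=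
  ((PySem.List.pyRange 0 (lst.length : Int) 1).foldl
      (fun occurrences i =>
        let element := PySem.List.pyGetD lst i 0
        if occurrences.contains element = false then
          occurrences.insert element [i, i]
        else
          -- occurrences[element][1] = i : in-place update of the stored two-element list
          occurrences.insert element (PySem.List.pySetD (occurrences.getD element []) 1 i))
      (PySem.Dict.empty : PySem.Dict Int (List Int))).items

-- ===== PORT B =====
def find_first_last_occurrences_alt (lst : List Int) : List (Int × List Int) :=
  let first : PySem.Dict Int Int :=
    (PySem.List.enumerate lst 0).foldl
      (fun d p => if d.contains p.2 = false then d.insert p.2 p.1 else d)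
      PySem.Dict.empty
  let last : PySem.Dict Int Int :=
    ((PySem.List.pyRange 0 (lst.length : Int) 1).reverse).foldl
      (fun d i =>
        let x := PySem.List.pyGetD lst i 0
        if d.contains x = false then d.insert x i else d)
      PySem.Dict.empty
  -- {x: [f, last[x]] for x, f in first.items()}  (last[x] always exists: keys of last ⊇ keys of first)
  (first.items.foldl (fun d p => d.insert p.1 [p.2, last.getD p.1 0]) PySem.Dict.empty).items

-- ===== PRECONDITION & SPEC =====
def Spec_find_first_last_occurrences (lst : List Int) (out : List (Int × List Int)) : Prop := out = find_first_last_occurrences_alt lst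
instance (lst : List Int) (out : List (Int × List Int)) : Decidable (Spec_find_first_last_occurrences lst out) := by unfold Spec_find_first_last_occurrences; infer_instance

-- ===== CLAIM (what is proved, stated in full; the proofs are below) =====
def Claim_equal_find_first_last_occurrences : Prop := ∀ (lst : List Int), Dom_find_first_last_occurrences lst → Spec_find_first_last_occurrences lst (find_first_last_occurrences lst)

-- ===== LEMMAS AND PROOFS =====

def pvStepK (d : PySem.Dict Int Int) (p : Int × Int) : PySem.Dict Int Int :=
  if d.contains p.2 = false then d.insert p.2 p.1 else d

lemma pvStepK_get? (d : PySem.Dict Int Int) (p : Int × Int) (y : Int) :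
    (pvStepK d p).get? y = ((d.get? y).orElse (fun _ => (pvStepK PySem.Dict.empty p).get? y)) := by
  unfold pvStepK
  by_cases hc : d.contains p.2 = false
  · have h0 : d.get? p.2 = none := by
      rw [PySem.Dict.get?_eq_none_iff_contains]; exact hc
    simp only [hc, PySem.Dict.contains_empty, if_true, PySem.Dict.get?_insert,
      PySem.Dict.get?_empty]
    by_cases hy : y = p.2
    · simp [hy, h0, Option.orElse]
    · simp only [hy, if_false]
      cases h2 : d.get? y <;> simp [h2, Option.orElse]
  · have h1 : (d.get? p.2).isSome := by
      rw [← PySem.Dict.contains_eq_isSome_get?]; simpa using hc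
    rcases Option.isSome_iff_exists.mp h1 with ⟨v, hv⟩
    simp only [hc, PySem.Dict.contains_empty, if_true, PySem.Dict.get?_insert,
      PySem.Dict.get?_empty]
    by_cases hy : y = p.2
    · simp [hy, hv, Option.orElse]
    · simp only [hy, if_false]
      cases h2 : d.get? y <;> simp [h2, Option.orElse]

lemma pvKeep_get? (l : List (Int × Int)) : ∀ (d : PySem.Dict Int Int) (y : Int),
    (l.foldl pvStepK d).get? y = ((d.get? y).orElse (fun _ => (l.foldl pvStepK PySem.Dict.empty).get? y)) := by
  induction l with
  | nil => intro d y; simp only [List.foldl_nil, PySem.Dict.get?_empty]; cases h2 : d.get? y <;> simp [h2, Option.orElse]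
  | cons p l ih =>
    intro d y
    rw [List.foldl_cons, List.foldl_cons, ih (pvStepK d p) y, ih (pvStepK PySem.Dict.empty p) y,
      pvStepK_get? d p y]
    cases d.get? y <;> cases (pvStepK PySem.Dict.empty p).get? y <;> simp [Option.orElse]
def pvStepA (d : PySem.Dict Int (List Int)) (p : Int × Int) : PySem.Dict Int (List Int) :=
  if d.contains p.2 = false then d.insert p.2 [p.1, p.1]
  else d.insert p.2 (PySem.List.pySetD (d.getD p.2 []) 1 p.1)

lemma pvNodup_keepK (l : List (Int × Int)) : ∀ (d : PySem.Dict Int Int),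
    d.keys.Nodup → (l.foldl pvStepK d).keys.Nodup := by
  induction l with
  | nil => intro d hd; simpa using hd
  | cons p l ih =>
    intro d hd
    rw [List.foldl_cons]
    apply ih
    unfold pvStepK
    split_ifs
    · exact PySem.Dict.nodup_keys_insert _ _ _ hd
    · exact hd

lemma pvNodup_A (l : List (Int × Int)) : ∀ (d : PySem.Dict Int (List Int)),
    d.keys.Nodup → (l.foldl pvStepA d).keys.Nodup := by
  induction l with
  | nil => intro d hd; simpa using hd
  | cons p l ih =>
    intro d hd
    rw [List.foldl_cons]
    apply ih
    unfold pvStepA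
    split_ifs
    · exact PySem.Dict.nodup_keys_insert _ _ _ hd
    · exact PySem.Dict.nodup_keys_insert _ _ _ hd

lemma pvEnum_append (lst : List Int) (x : Int) :
    PySem.List.enumerate (lst ++ [x]) 0 = PySem.List.enumerate lst 0 ++ [((lst.length : Int), x)] := by
  rw [PySem.List.enumerate_append]
  simp [PySem.List.enumerate_cons, PySem.List.enumerate_nil]

lemma pvLast_getD (lst : List Int) (x y : Int) :
    ((PySem.List.enumerate (lst ++ [x]) 0).reverse.foldl pvStepK PySem.Dict.empty).getD y 0
      = if y = x then (lst.length : Int)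
        else ((PySem.List.enumerate lst 0).reverse.foldl pvStepK PySem.Dict.empty).getD y 0 := by
  rw [pvEnum_append, List.reverse_append]
  simp only [List.reverse_singleton, List.singleton_append, List.foldl_cons]
  have hstep : pvStepK PySem.Dict.empty ((lst.length : Int), x)
      = PySem.Dict.empty.insert x (lst.length : Int) := by
    unfold pvStepK; simp [PySem.Dict.contains_empty]
  rw [hstep, PySem.Dict.getD_eq_get?_getD, pvKeep_get?]
  by_cases hy : y = x
  · subst hy
    simp [PySem.Dict.get?_insert_self, Option.orElse]
  · rw [PySem.Dict.getD_eq_get?_getD]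
    simp only [hy, if_false]
    have h2 : (PySem.Dict.empty.insert x (lst.length : Int)).get? y = none := by
      simp [PySem.Dict.get?_insert, hy, PySem.Dict.get?_empty]
    rw [h2]
    cases h3 : ((PySem.List.enumerate lst 0).reverse.foldl pvStepK PySem.Dict.empty).get? y <;>
      simp [Option.orElse]

lemma pvMain (lst : List Int) :
    ((PySem.List.enumerate lst 0).foldl pvStepA PySem.Dict.empty).items
      = ((PySem.List.enumerate lst 0).foldl pvStepK PySem.Dict.empty).items.map
          (fun p => (p.1, [p.2, ((PySem.List.enumerate lst 0).reverse.foldl pvStepK PySem.Dict.empty).getD p.1 0])) := by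
  induction lst using List.reverseRecOn with
  | nil => simp [PySem.List.enumerate_nil, PySem.Dict.empty]
  | append_singleton lst x ih =>
    set n : Int := (lst.length : Int) with hn
    set A := (PySem.List.enumerate lst 0).foldl pvStepA PySem.Dict.empty with hA
    set F := (PySem.List.enumerate lst 0).foldl pvStepK PySem.Dict.empty with hF
    set L := (PySem.List.enumerate lst 0).reverse.foldl pvStepK PySem.Dict.empty with hL
    have hmapfun : (fun p : Int × Int => (p.1, [p.2,
          ((PySem.List.enumerate (lst ++ [x]) 0).reverse.foldl pvStepK PySem.Dict.empty).getD p.1 0]))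
        = (fun p : Int × Int => (p.1, [p.2, if p.1 = x then n else L.getD p.1 0])) := by
      funext p; rw [pvLast_getD]
    rw [hmapfun, pvEnum_append, List.foldl_append, List.foldl_append]
    simp only [List.foldl_cons, List.foldl_nil]
    rw [← hA, ← hF]
    have hkeys : A.keys = F.keys := by
      simp only [PySem.Dict.keys, ih, List.map_map]
      rfl
    have hcontains : A.contains x = F.contains x := by
      rw [PySem.Dict.contains_eq_decide_mem_keys, PySem.Dict.contains_eq_decide_mem_keys, hkeys]
    have hFnodup : F.keys.Nodup := pvNodup_keepK _ _ (by simp [PySem.Dict.keys_empty])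
    have hAnodup : A.keys.Nodup := pvNodup_A _ _ (by simp [PySem.Dict.keys_empty])
    by_cases hc : F.contains x = false
    · -- x is a new key: both sides append an entry
      have hnotmem : x ∉ F.keys := by
        rw [PySem.Dict.contains_eq_decide_mem_keys] at hc
        simpa using hc
      have hne : ∀ p ∈ F.items, p.1 ≠ x := by
        intro p hp hpx
        exact hnotmem (hpx ▸ PySem.Dict.mem_keys_of_mem_items _ hp)
      have hstepA : pvStepA A (n, x) = A.insert x [n, n] := by
        unfold pvStepA; rw [if_pos (hcontains.trans hc)]
      have hstepK : pvStepK F (n, x) = F.insert x n := by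
        unfold pvStepK; rw [if_pos hc]
      rw [hstepA, hstepK,
        PySem.Dict.items_insert_of_not_contains _ _ (hcontains.trans hc),
        PySem.Dict.items_insert_of_not_contains _ _ hc,
        List.map_append]
      simp only [List.map_cons, List.map_nil]
      congr 1
      · rw [ih]
        apply List.map_congr_left
        intro p hp
        simp [hne p hp]
    · -- x already present: A updates the second slot in place, F is unchanged
      have hcx : F.contains x = true := by
        cases h : F.contains x
        · exact absurd h hc
        · rfl
      have hxk : x ∈ F.keys := by
        rw [PySem.Dict.contains_eq_decide_mem_keys] at hcx
        simpa using hcx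
      obtain ⟨q, hq, hq1⟩ := List.mem_map.mp hxk
      obtain ⟨f, hf⟩ : ∃ f, (x, f) ∈ F.items := ⟨q.2, by rw [← hq1]; exact hq⟩
      have hmemA : (x, [f, L.getD x 0]) ∈ A.items := by
        rw [ih]
        exact List.mem_map.mpr ⟨(x, f), hf, rfl⟩
      have hgd : A.getD x [] = [f, L.getD x 0] :=
        PySem.Dict.getD_of_mem_items _ hmemA hAnodup []
      have hset : PySem.List.pySetD [f, L.getD x 0] 1 n = [f, n] := by
        rw [PySem.List.pySetD_of_nonneg _ _ (by norm_num)]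
        rfl
      have hstepA : pvStepA A (n, x) = A.insert x [f, n] := by
        unfold pvStepA
        rw [if_neg (by rw [hcontains]; exact hc), hgd, hset]
      have hstepK : pvStepK F (n, x) = F := by
        unfold pvStepK; rw [if_neg hc]
      rw [hstepA, hstepK,
        PySem.Dict.items_insert_of_contains _ _ (by rw [hcontains]; exact hcx),
        ih, List.map_map]
      apply List.map_congr_left
      intro p hp
      simp only [Function.comp]
      by_cases hpx : p.1 = x
      · have hpf : p.2 = f := by
          have e1 : F.get? x = some p.2 :=
            PySem.Dict.get?_of_mem_items _ (by rw [← hpx]; exact hp) hFnodup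
          have e2 : F.get? x = some f := PySem.Dict.get?_of_mem_items _ hf hFnodup
          exact Option.some.inj (e1.symm.trans e2)
        simp [hpx, hpf]
      · simp [hpx]

lemma pvA_eq (lst : List Int) :
    find_first_last_occurrences lst
      = ((PySem.List.enumerate lst 0).foldl pvStepA PySem.Dict.empty).items := by
  unfold find_first_last_occurrences
  rw [PySem.List.enumerate_eq_map_pyRange lst (0 : Int), List.foldl_map]
  rfl

lemma pvB_eq (lst : List Int) :
    find_first_last_occurrences_alt lst
      = ((PySem.List.enumerate lst 0).foldl pvStepK PySem.Dict.empty).items.map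
          (fun p => (p.1, [p.2, ((PySem.List.enumerate lst 0).reverse.foldl pvStepK PySem.Dict.empty).getD p.1 0])) := by
  unfold find_first_last_occurrences_alt
  have hfirst : (PySem.List.enumerate lst 0).foldl
      (fun (d : PySem.Dict Int Int) (p : Int × Int) =>
        if d.contains p.2 = false then d.insert p.2 p.1 else d) PySem.Dict.empty
      = (PySem.List.enumerate lst 0).foldl pvStepK PySem.Dict.empty := rfl
  have hlast : ((PySem.List.pyRange 0 (lst.length : Int) 1).reverse).foldl
      (fun (d : PySem.Dict Int Int) (i : Int) =>
        let x := PySem.List.pyGetD lst i 0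
        if d.contains x = false then d.insert x i else d) PySem.Dict.empty
      = (PySem.List.enumerate lst 0).reverse.foldl pvStepK PySem.Dict.empty := by
    rw [PySem.List.enumerate_eq_map_pyRange lst (0 : Int), ← List.map_reverse, List.foldl_map]
    rfl
  simp only [hfirst, hlast]
  set F := (PySem.List.enumerate lst 0).foldl pvStepK PySem.Dict.empty with hF
  set L := (PySem.List.enumerate lst 0).reverse.foldl pvStepK PySem.Dict.empty with hL
  rw [PySem.Dict.items_foldl_insert_fresh F.items (fun p => p.1) (fun p => [p.2, L.getD p.1 0])
      PySem.Dict.empty (fun a _ => PySem.Dict.contains_empty _)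
      (pvNodup_keepK _ _ PySem.Dict.nodup_keys_empty)]
  simp [PySem.Dict.empty]


-- ===== VERDICT (by name: the statement is the Claim_ definition above) =====
theorem find_first_last_occurrences_spec : Claim_equal_find_first_last_occurrences := by
  intro lst _
  unfold Spec_find_first_last_occurrences
  rw [pvA_eq, pvB_eq, pvMain]
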